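-- pv_equiv track=rewrite | github.com/subhande/dsa | google_interview_questions/longest_non_decreasing_subarray_with_one_substitution.py | longestNonDecreasingSubarrayWithOneSubstitution
-- ===== SOURCE A (Python) =====
-- def longestNonDecreasingSubarrayWithOneSubstitution(arr):
--     n = len(arr)
--     l = [1] * n
--     r = [1] * n
--
--     # Step 1: Compute l[] where l[i] is the length of longest non-decreasing
--     # subarray ending at index i without any modification.
--     for i in range(1, n):
--         if arr[i] >= arr[i - 1]:
--             l[i] = l[i - 1] + 1
--
--     # Step 2: Compute r[] where r[i] is the length of longest non-decreasing
--     # subarray starting at index i.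
--     for i in range(n - 2, -1, -1):
--         if arr[i] <= arr[i + 1]:
--             r[i] = r[i + 1] + 1
--
--
--      # Without substitution, answer is the maximum in l.
--     ans = max(l)
--     # Step 3: Try every element as candidate for substitution.
--     for i in range(n):
--         # Extend using left part and/or right part depending on position.
--         # left_count is the length from the left part ending at (i-1)
--         left_count = l[i-1] if i-1 >= 0 else 0
--         # right_count is the length from the right part starting at (i+1)
--         right_count = r[i+1] if i+1 < n else 0
--
--         if i == 0:
--             # At position 0, just substitute and attach the right side.
--             candidate = 1 + right_count
--         elif i == n-1:
--             # At last position, substitute and attach the left side.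
--             candidate = left_count + 1
--         else:
--             # Both left and right parts exist.
--             # We can merge if we are allowed to pick a number X such that:
--             # arr[i-1] <= X <= arr[i+1]
--             if arr[i-1] <= arr[i+1]:
--                 candidate = left_count + 1 + right_count
--             else:
--                 # Cannot bridge both sides. But we can still keep one side.
--                 candidate = max(left_count, right_count) + 1
--
--         ans = max(ans, candidate)
--
--     return ans
-- ===== SOURCE B (Python) =====
-- def longestNonDecreasingSubarrayWithOneSubstitution(arr):
--     # Single forward pass: f = longest non-decreasing run ending at i,
--     # g = longest window ending at i (arr[i] kept) with at most one earlier
--     # element substituted, h = window ending at i with arr[i] substituted.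
--     n = len(arr)
--     ans = 0
--     fprev2 = 0  # f at i-2
--     fprev = 0   # f at i-1
--     g = 0       # g at i-1
--     for i in range(n):
--         if i == 0:
--             fcur, gcur, h = 1, 1, 1
--         else:
--             fcur = fprev + 1 if arr[i] >= arr[i - 1] else 1
--             keep = g + 1 if arr[i] >= arr[i - 1] else 1
--             swap_prev = fprev2 + 2 if i >= 2 and arr[i] >= arr[i - 2] else 2
--             gcur = max(keep, swap_prev)
--             h = fprev + 1
--         ans = max(ans, gcur, h)
--         fprev2, fprev, g = fprev, fcur, gcur
--     return ans
-- ===== Notes on version B (the rewrite author's own statement) =====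
-- stated objective: alternative
-- what changed: Replaces the three passes with auxiliary l[]/r[] arrays and a per-index bridging scan by a single forward pass keeping three running lengths (plain run, best window with one earlier substitution, window with the current element substituted), using O(1) extra space instead of O(n).
-- outside the precondition, e.g. on longestNonDecreasingSubarrayWithOneSubstitution([]): A raises ValueError, B returns 0
import Mathlib
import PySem

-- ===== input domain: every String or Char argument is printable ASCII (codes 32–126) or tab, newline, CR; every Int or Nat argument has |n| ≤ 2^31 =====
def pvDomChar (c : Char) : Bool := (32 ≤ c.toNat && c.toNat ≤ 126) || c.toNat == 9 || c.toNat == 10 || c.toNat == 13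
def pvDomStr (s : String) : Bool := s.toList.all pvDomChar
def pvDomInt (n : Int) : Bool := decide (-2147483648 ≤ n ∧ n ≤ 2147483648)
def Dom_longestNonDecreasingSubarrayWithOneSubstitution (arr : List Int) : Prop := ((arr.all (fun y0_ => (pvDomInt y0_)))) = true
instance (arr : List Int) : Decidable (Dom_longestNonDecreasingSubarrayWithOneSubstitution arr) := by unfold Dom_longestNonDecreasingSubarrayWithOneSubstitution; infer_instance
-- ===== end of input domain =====

-- B replaces A's three passes with l[]/r[] arrays by one forward pass over three running
-- lengths in O(1) extra space; equivalence is proved for every non-empty list (A raises on []).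

-- ===== PORT A =====
def longestNonDecreasingSubarrayWithOneSubstitution (arr : List Int) : Int :=
  let n : Int := arr.length
  let l0 : List Int := List.replicate arr.length 1
  let r0 : List Int := List.replicate arr.length 1
  let l := (PySem.List.pyRange 1 n 1).foldl (fun l i =>
      if PySem.List.pyGetD arr i 0 ≥ PySem.List.pyGetD arr (i - 1) 0 then
        PySem.List.pySetD l i (PySem.List.pyGetD l (i - 1) 0 + 1)
      else l) l0
  let r := (PySem.List.pyRange (n - 2) (-1) (-1)).foldl (fun r i =>
      if PySem.List.pyGetD arr i 0 ≤ PySem.List.pyGetD arr (i + 1) 0 then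
        PySem.List.pySetD r i (PySem.List.pyGetD r (i + 1) 0 + 1)
      else r) r0
  let ans : Int := match PySem.List.max? l (fun x => x) with
    | some m => m
    | none => 0      -- max([]) raises ValueError: the empty list is excluded by Pre_
  (PySem.List.pyRange 0 n 1).foldl (fun ans i =>
    let left_count : Int := if 0 ≤ i - 1 then PySem.List.pyGetD l (i - 1) 0 else 0
    let right_count : Int := if i + 1 < n then PySem.List.pyGetD r (i + 1) 0 else 0
    let candidate : Int :=
      if i = 0 then 1 + right_count
      else if i = n - 1 then left_count + 1
      else if PySem.List.pyGetD arr (i - 1) 0 ≤ PySem.List.pyGetD arr (i + 1) 0 then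
        left_count + 1 + right_count
      else max left_count right_count + 1
    max ans candidate) ans

-- ===== PORT B =====
def longestNonDecreasingSubarrayWithOneSubstitution_alt (arr : List Int) : Int :=
  let n : Int := arr.length
  let s := (PySem.List.pyRange 0 n 1).foldl (fun (s : Int × Int × Int × Int) i =>
    let ans := s.1
    let fprev2 := s.2.1
    let fprev := s.2.2.1
    let g := s.2.2.2
    let t : Int × Int × Int :=
      if i = 0 then (1, 1, 1)
      else
        let fcur := if PySem.List.pyGetD arr i 0 ≥ PySem.List.pyGetD arr (i - 1) 0 then fprev + 1 else 1
        let keep := if PySem.List.pyGetD arr i 0 ≥ PySem.List.pyGetD arr (i - 1) 0 then g + 1 else 1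
        let swap := if 2 ≤ i ∧ PySem.List.pyGetD arr i 0 ≥ PySem.List.pyGetD arr (i - 2) 0 then fprev2 + 2 else 2
        (fcur, max keep swap, fprev + 1)
    (max (max ans t.2.1) t.2.2, fprev, t.1, t.2.1)) (0, 0, 0, 0)
  s.1

-- ===== PRECONDITION & SPEC =====
-- Pre_ excludes only the empty list, on which A raises ValueError (max of an empty sequence).
def Pre_longestNonDecreasingSubarrayWithOneSubstitution (arr : List Int) : Prop := arr ≠ []
instance (arr : List Int) : Decidable (Pre_longestNonDecreasingSubarrayWithOneSubstitution arr) := by unfold Pre_longestNonDecreasingSubarrayWithOneSubstitution; infer_instance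
def pvWitness_longestNonDecreasingSubarrayWithOneSubstitution : List Int := [1, 0, 2]
def Spec_longestNonDecreasingSubarrayWithOneSubstitution (arr : List Int) (out : Int) : Prop := out = longestNonDecreasingSubarrayWithOneSubstitution_alt arr
instance (arr : List Int) (out : Int) : Decidable (Spec_longestNonDecreasingSubarrayWithOneSubstitution arr out) := by unfold Spec_longestNonDecreasingSubarrayWithOneSubstitution; infer_instance

-- ===== CLAIM (what is proved, stated in full; the proofs are below) =====
def Claim_equal_longestNonDecreasingSubarrayWithOneSubstitution : Prop := ∀ (arr : List Int), Dom_longestNonDecreasingSubarrayWithOneSubstitution arr → Pre_longestNonDecreasingSubarrayWithOneSubstitution arr → Spec_longestNonDecreasingSubarrayWithOneSubstitution arr (longestNonDecreasingSubarrayWithOneSubstitution arr)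
-- ===== LEMMAS AND PROOFS =====

-- Nat-valued models of the quantities both programs compute.
-- elL a i = A's l[i]: length of the longest non-decreasing run ending at i.
def elL (a : List Int) : Nat → Nat
  | 0 => 1
  | i + 1 => if a.getD i 0 ≤ a.getD (i + 1) 0 then elL a i + 1 else 1

-- elR a i = A's r[i]: length of the longest non-decreasing run starting at i.
def elR (a : List Int) (i : Nat) : Nat :=
  if h : i + 1 < a.length then
    (if a.getD i 0 ≤ a.getD (i + 1) 0 then elR a (i + 1) + 1 else 1)
  else 1
termination_by a.length - i

-- dpG a i = B's g at i: longest window ending at i, a[i] kept, ≤ 1 earlier element substituted.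
def dpG (a : List Int) : Nat → Nat
  | 0 => 1
  | i + 1 => max (if a.getD i 0 ≤ a.getD (i + 1) 0 then dpG a i + 1 else 1)
                 (if 1 ≤ i ∧ a.getD (i - 1) 0 ≤ a.getD (i + 1) 0 then elL a (i - 1) + 2 else 2)

-- dpH a i = B's h at i: window ending at i with a[i] substituted.
def dpH (a : List Int) : Nat → Nat
  | 0 => 1
  | i + 1 => elL a i + 1

-- candA a i = A's candidate at index i.
def candA (a : List Int) (i : Nat) : Nat :=
  let left := if 1 ≤ i then elL a (i - 1) else 0
  let right := if i + 1 < a.length then elR a (i + 1) else 0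
  if i = 0 then 1 + right
  else if i = a.length - 1 then left + 1
  else if a.getD (i - 1) 0 ≤ a.getD (i + 1) 0 then left + 1 + right
  else max left right + 1

def maxLM (a : List Int) : Nat := (List.range a.length).foldl (fun s k => max s (elL a k)) 0
def ansAM (a : List Int) : Nat := (List.range a.length).foldl (fun s k => max s (candA a k)) (maxLM a)
def ansBM (a : List Int) : Nat := (List.range a.length).foldl (fun s k => max s (max (dpG a k) (dpH a k))) 0

-- generic running-max facts
theorem foldmax_le {f : Nat → Nat} {c init : Nat} (l : List Nat)
    (h0 : init ≤ c) (h : ∀ x ∈ l, f x ≤ c) :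
    l.foldl (fun s k => max s (f k)) init ≤ c := by
  induction l generalizing init with
  | nil => exact h0
  | cons x t ih =>
      exact ih (max_le h0 (h x (by simp))) (fun y hy => h y (by simp [hy]))

theorem le_foldmax_init {f : Nat → Nat} (l : List Nat) (init : Nat) :
    init ≤ l.foldl (fun s k => max s (f k)) init := by
  induction l generalizing init with
  | nil => simp
  | cons x t ih => exact le_trans (le_max_left _ _) (ih (max init (f x)))

theorem le_foldmax_mem {f : Nat → Nat} {x : Nat} (l : List Nat) (init : Nat) (hx : x ∈ l) :
    f x ≤ l.foldl (fun s k => max s (f k)) init := by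
  induction l generalizing init with
  | nil => cases hx
  | cons y t ih =>
      rcases List.mem_cons.mp hx with h | h
      · subst h; exact le_trans (le_max_right _ _) (le_foldmax_init t _)
      · exact ih _ h

-- ===== basic facts about the models =====
theorem elL_pos (a : List Int) (i : Nat) : 1 ≤ elL a i := by
  cases i with
  | zero => simp [elL]
  | succ i => unfold elL; split <;> omega

theorem elR_pos (a : List Int) (i : Nat) : 1 ≤ elR a i := by
  unfold elR; split
  · split <;> omega
  · omega

theorem elL_succ_le (a : List Int) (i : Nat) : elL a (i + 1) ≤ elL a i + 1 := by
  show (if a.getD i 0 ≤ a.getD (i + 1) 0 then elL a i + 1 else 1) ≤ elL a i + 1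
  split <;> omega

theorem elR_le (a : List Int) (i : Nat) (h : i < a.length) : elR a i ≤ a.length - i := by
  unfold elR
  split
  · split
    · have := elR_le a (i + 1) (by omega)
      omega
    · omega
  · omega
termination_by a.length - i

-- within a run starting at j, consecutive elements are ordered
theorem elR_unfold (a : List Int) (j : Nat) (h : 1 < elR a j) :
    a.getD j 0 ≤ a.getD (j + 1) 0 ∧ elR a j = elR a (j + 1) + 1 := by
  rw [elR] at h ⊢
  split at h
  · split at h
    · simp_all
    · omega
  · omega

theorem elR_chain (a : List Int) : ∀ k j, k + 1 < elR a j →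
    a.getD (j + k) 0 ≤ a.getD (j + k + 1) 0 := by
  intro k
  induction k with
  | zero =>
      intro j h
      simpa using (elR_unfold a j (by omega)).1
  | succ k ih =>
      intro j h
      obtain ⟨-, he⟩ := elR_unfold a j (by omega)
      have := ih (j + 1) (by omega)
      have e1 : j + 1 + k = j + (k + 1) := by omega
      have e2 : j + 1 + k + 1 = j + (k + 1) + 1 := by omega
      rwa [e1] at this

theorem elL_step (a : List Int) (m : Nat) (h : a.getD m 0 ≤ a.getD (m + 1) 0) :
    elL a (m + 1) = elL a m + 1 := by
  show (if a.getD m 0 ≤ a.getD (m + 1) 0 then elL a m + 1 else 1) = elL a m + 1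
  rw [if_pos h]

theorem elR_le_elL (a : List Int) : ∀ k j, k < elR a j → k + 1 ≤ elL a (j + k) := by
  intro k
  induction k with
  | zero => intro j _; simpa using elL_pos a j
  | succ k ih =>
      intro j h
      have hc := elR_chain a k j (by omega)
      have hL := ih j (by omega)
      have : elL a (j + k + 1) = elL a (j + k) + 1 := elL_step a (j + k) hc
      have e : j + (k + 1) = j + k + 1 := by omega
      rw [e, this]; omega

theorem dpG_keep (a : List Int) (m : Nat) (h : a.getD m 0 ≤ a.getD (m + 1) 0) :
    dpG a m + 1 ≤ dpG a (m + 1) := by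
  refine le_trans ?_ (le_max_left _ (if 1 ≤ m ∧ a.getD (m - 1) 0 ≤ a.getD (m + 1) 0 then elL a (m - 1) + 2 else 2))
  rw [if_pos h]

theorem dpG_extend (a : List Int) : ∀ k j, k < elR a j → dpG a j + k ≤ dpG a (j + k) := by
  intro k
  induction k with
  | zero => intro j _; simp
  | succ k ih =>
      intro j h
      have hc := elR_chain a k j (by omega)
      have := dpG_keep a (j + k) hc
      have hk := ih j (by omega)
      have e : j + (k + 1) = j + k + 1 := by omega
      rw [e]; omega

theorem dpG_ge_two (a : List Int) (i : Nat) : 2 ≤ dpG a (i + 1) := by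
  show 2 ≤ max _ (if 1 ≤ i ∧ a.getD (i - 1) 0 ≤ a.getD (i + 1) 0 then elL a (i - 1) + 2 else 2)
  exact le_trans (by split <;> omega) (le_max_right _ _)

-- evaluation lemmas for candA
theorem candA_zero (a : List Int) :
    candA a 0 = 1 + (if 1 < a.length then elR a 1 else 0) := by
  unfold candA
  dsimp only
  simp

theorem candA_last (a : List Int) (i : Nat) (h1 : 1 ≤ i) (h2 : i = a.length - 1) :
    candA a i = elL a (i - 1) + 1 := by
  unfold candA
  dsimp only
  rw [if_neg (by omega), if_pos h2, if_pos h1]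

theorem candA_mid_bridge (a : List Int) (i : Nat) (h1 : 1 ≤ i) (h2 : i + 1 < a.length)
    (hbr : a.getD (i - 1) 0 ≤ a.getD (i + 1) 0) :
    candA a i = elL a (i - 1) + 1 + elR a (i + 1) := by
  unfold candA
  dsimp only
  rw [if_neg (by omega), if_neg (by omega), if_pos hbr, if_pos h1, if_pos h2]

theorem candA_mid_nobridge (a : List Int) (i : Nat) (h1 : 1 ≤ i) (h2 : i + 1 < a.length)
    (hbr : ¬ a.getD (i - 1) 0 ≤ a.getD (i + 1) 0) :
    candA a i = max (elL a (i - 1)) (elR a (i + 1)) + 1 := by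
  unfold candA
  dsimp only
  rw [if_neg (by omega), if_neg (by omega), if_neg hbr, if_pos h1, if_pos h2]

theorem dpG_succ_eval (a : List Int) (i : Nat) :
    dpG a (i + 1) = max (if a.getD i 0 ≤ a.getD (i + 1) 0 then dpG a i + 1 else 1)
                        (if 1 ≤ i ∧ a.getD (i - 1) 0 ≤ a.getD (i + 1) 0 then elL a (i - 1) + 2 else 2) := rfl

-- ===== the two directions =====
theorem elL_le_maxL (a : List Int) (i : Nat) (h : i < a.length) : elL a i ≤ maxLM a :=
  le_foldmax_mem _ _ (List.mem_range.mpr h)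

theorem maxL_le_ansA (a : List Int) : maxLM a ≤ ansAM a := le_foldmax_init _ _

theorem candA_le_ansA (a : List Int) (i : Nat) (h : i < a.length) : candA a i ≤ ansAM a :=
  le_foldmax_mem _ _ (List.mem_range.mpr h)

theorem elR_le_maxL (a : List Int) (j : Nat) (h : j < a.length) : elR a j ≤ maxLM a := by
  have h1 := elR_pos a j
  have h2 := elR_le a j h
  have h3 := elR_le_elL a (elR a j - 1) j (by omega)
  have h4 : j + (elR a j - 1) < a.length := by omega
  have := elL_le_maxL a (j + (elR a j - 1)) h4
  omega

theorem dpH_le_ansA (a : List Int) (i : Nat) (h : i < a.length) : dpH a i ≤ ansAM a := by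
  cases i with
  | zero =>
      have := elL_le_maxL a 0 h
      have := maxL_le_ansA a
      have : (1 : Nat) ≤ elL a 0 := elL_pos a 0
      simp only [dpH]; omega
  | succ i =>
      simp only [dpH]
      by_cases hl : i + 1 = a.length - 1
      · have hc := candA_last a (i + 1) (by omega) hl
        simp only [Nat.add_sub_cancel] at hc
        have := candA_le_ansA a (i + 1) h
        omega
      · have h2 : i + 2 < a.length := by omega
        have hr := elR_pos a (i + 2)
        have hc : elL a i + 1 ≤ candA a (i + 1) := by
          by_cases hbr : a.getD i 0 ≤ a.getD (i + 2) 0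
          · rw [candA_mid_bridge a (i + 1) (by omega) (by omega) (by simpa using hbr)]
            simp only [Nat.add_sub_cancel]; omega
          · rw [candA_mid_nobridge a (i + 1) (by omega) (by omega) (by simpa using hbr)]
            simp only [Nat.add_sub_cancel]
            have := le_max_left (elL a i) (elR a (i + 2))
            omega
        exact le_trans hc (candA_le_ansA a (i + 1) h)

theorem GplusR_le (a : List Int) : ∀ i, i < a.length → dpG a i + elR a i ≤ ansAM a + 1 := by
  intro i
  induction i with
  | zero =>
      intro h
      have := elR_le_maxL a 0 h
      have := maxL_le_ansA a
      simp only [dpG]; omega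
  | succ i ih =>
      intro h
      rw [dpG_succ_eval]
      have hR1 : elR a (i + 1) ≤ ansAM a := le_trans (elR_le_maxL a (i + 1) h) (maxL_le_ansA a)
      have hkeep : (if a.getD i 0 ≤ a.getD (i + 1) 0 then dpG a i + 1 else 1) + elR a (i + 1) ≤ ansAM a + 1 := by
        split
        · next hcmp =>
            have he : elR a i = elR a (i + 1) + 1 := by
              rw [elR]; rw [dif_pos h, if_pos hcmp]
            have := ih (by omega)
            omega
        · omega
      have hswap : (if 1 ≤ i ∧ a.getD (i - 1) 0 ≤ a.getD (i + 1) 0 then elL a (i - 1) + 2 else 2) + elR a (i + 1) ≤ ansAM a + 1 := by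
        split
        · next hcmp =>
            have hc := candA_mid_bridge a i hcmp.1 h hcmp.2
            have := candA_le_ansA a i (by omega)
            omega
        · next hcmp =>
            rcases Nat.eq_zero_or_pos i with hi | hi
            · subst hi
              have hc := candA_zero a
              rw [if_pos (by omega)] at hc
              have := candA_le_ansA a 0 (by omega)
              simp only [Nat.zero_add]
              omega
            · have hbr : ¬ a.getD (i - 1) 0 ≤ a.getD (i + 1) 0 := by
                intro hx; exact hcmp ⟨hi, hx⟩
              have hc := candA_mid_nobridge a i hi h hbr
              have := candA_le_ansA a i (by omega)
              have := le_max_right (elL a (i - 1)) (elR a (i + 1))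
              omega
      rw [← max_add_add_right]
      exact max_le hkeep hswap

theorem ansB_le_ansA (a : List Int) : ansBM a ≤ ansAM a := by
  refine foldmax_le _ (Nat.zero_le _) ?_
  intro i hi
  rw [List.mem_range] at hi
  have h1 := GplusR_le a i hi
  have h2 := elR_pos a i
  have h3 := dpH_le_ansA a i hi
  exact max_le (by omega) h3

-- the other direction
theorem dpG_le_ansB (a : List Int) (i : Nat) (h : i < a.length) : dpG a i ≤ ansBM a := by
  have := le_foldmax_mem (f := fun k => max (dpG a k) (dpH a k)) (List.range a.length) 0 (List.mem_range.mpr h)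
  unfold ansBM
  exact le_trans (le_max_left _ _) this

theorem dpH_le_ansB (a : List Int) (i : Nat) (h : i < a.length) : dpH a i ≤ ansBM a := by
  have := le_foldmax_mem (f := fun k => max (dpG a k) (dpH a k)) (List.range a.length) 0 (List.mem_range.mpr h)
  unfold ansBM
  exact le_trans (le_max_right _ _) this

theorem extend_le_ansB (a : List Int) (j c : Nat) (h : j < a.length) (hc : c ≤ dpG a j) :
    c + elR a j - 1 ≤ ansBM a := by
  have h1 := elR_pos a j
  have h2 := elR_le a j h
  have h3 := dpG_extend a (elR a j - 1) j (by omega)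
  have h4 : j + (elR a j - 1) < a.length := by omega
  have := dpG_le_ansB a (j + (elR a j - 1)) h4
  omega

theorem elL_le_ansB (a : List Int) (i : Nat) (h : i < a.length) : elL a i ≤ ansBM a := by
  by_cases h2 : i + 1 < a.length
  · have : elL a i + 1 = dpH a (i + 1) := rfl
    have := dpH_le_ansB a (i + 1) h2
    omega
  · cases i with
    | zero =>
        have : dpH a 0 = 1 := rfl
        have := dpH_le_ansB a 0 h
        have := elL_pos a 0
        simp only [elL]; omega
    | succ i =>
        have hs := elL_succ_le a i
        have : dpH a (i + 1) = elL a i + 1 := rfl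
        have := dpH_le_ansB a (i + 1) (by omega)
        omega

theorem candA_le_ansB (a : List Int) (i : Nat) (h : i < a.length) : candA a i ≤ ansBM a := by
  rcases Nat.eq_zero_or_pos i with hi | hi
  · subst hi
    rw [candA_zero]
    by_cases h2 : 1 < a.length
    · rw [if_pos h2]
      have hg : 2 ≤ dpG a 1 := dpG_ge_two a 0
      have := extend_le_ansB a 1 2 h2 hg
      have := elR_pos a 1
      omega
    · rw [if_neg h2]
      have : dpH a 0 = 1 := rfl
      have := dpH_le_ansB a 0 h
      omega
  · by_cases hl : i = a.length - 1
    · rw [candA_last a i hi hl]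
      have he : dpH a ((i - 1) + 1) = elL a (i - 1) + 1 := rfl
      have h2 : (i - 1) + 1 = i := by omega
      rw [h2] at he
      have := dpH_le_ansB a i h
      omega
    · have h2 : i + 1 < a.length := by omega
      by_cases hbr : a.getD (i - 1) 0 ≤ a.getD (i + 1) 0
      · rw [candA_mid_bridge a i hi h2 hbr]
        have hg : elL a (i - 1) + 2 ≤ dpG a (i + 1) := by
          rw [dpG_succ_eval]
          refine le_trans ?_ (le_max_right _ _)
          rw [if_pos ⟨hi, hbr⟩]
        have := extend_le_ansB a (i + 1) (elL a (i - 1) + 2) h2 hg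
        have := elR_pos a (i + 1)
        omega
      · rw [candA_mid_nobridge a i hi h2 hbr]
        have hL : elL a (i - 1) + 1 ≤ ansBM a := by
          have he : dpH a ((i - 1) + 1) = elL a (i - 1) + 1 := rfl
          have h3 : (i - 1) + 1 = i := by omega
          rw [h3] at he
          have := dpH_le_ansB a i h
          omega
        have hR : elR a (i + 1) + 1 ≤ ansBM a := by
          have hg : 2 ≤ dpG a (i + 1) := dpG_ge_two a i
          have := extend_le_ansB a (i + 1) 2 h2 hg
          have := elR_pos a (i + 1)
          omega
        rw [← max_add_add_right]
        exact max_le hL hR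

theorem ansA_le_ansB (a : List Int) : ansAM a ≤ ansBM a := by
  refine foldmax_le _ ?_ ?_
  · refine foldmax_le _ (Nat.zero_le _) ?_
    intro i hi
    exact elL_le_ansB a i (List.mem_range.mp hi)
  · intro i hi
    exact candA_le_ansB a i (List.mem_range.mp hi)

-- ===== ansAM = ansBM on non-empty lists =====
theorem ansAM_eq_ansBM (a : List Int) : ansAM a = ansBM a :=
  Nat.le_antisymm (ansA_le_ansB a) (ansB_le_ansA a)

-- ===== port A computes ansAM, port B computes ansBM =====
-- the loop bodies of port A, as named functions (identical text)
def stepAL (arr : List Int) (l : List Int) (i : Int) : List Int :=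
  if PySem.List.pyGetD arr i 0 ≥ PySem.List.pyGetD arr (i - 1) 0 then
    PySem.List.pySetD l i (PySem.List.pyGetD l (i - 1) 0 + 1)
  else l

def stepAR (arr : List Int) (r : List Int) (i : Int) : List Int :=
  if PySem.List.pyGetD arr i 0 ≤ PySem.List.pyGetD arr (i + 1) 0 then
    PySem.List.pySetD r i (PySem.List.pyGetD r (i + 1) 0 + 1)
  else r

def stepAns (arr l r : List Int) (n : Int) (ans i : Int) : Int :=
  let left_count : Int := if 0 ≤ i - 1 then PySem.List.pyGetD l (i - 1) 0 else 0
  let right_count : Int := if i + 1 < n then PySem.List.pyGetD r (i + 1) 0 else 0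
  let candidate : Int :=
    if i = 0 then 1 + right_count
    else if i = n - 1 then left_count + 1
    else if PySem.List.pyGetD arr (i - 1) 0 ≤ PySem.List.pyGetD arr (i + 1) 0 then
      left_count + 1 + right_count
    else max left_count right_count + 1
  max ans candidate

def Lst (a : List Int) (m : Nat) : List Int :=
  (List.range a.length).map (fun i => if i ≤ m then ((elL a i : Nat) : Int) else 1)

def Rst (a : List Int) (t : Nat) : List Int :=
  (List.range a.length).map (fun i => if t ≤ i then ((elR a i : Nat) : Int) else 1)

theorem set_map_range {f : Nat → Int} {n j : Nat} (v : Int) (hj : j < n) :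
    ((List.range n).map f).set j v = (List.range n).map (fun i => if i = j then v else f i) := by
  apply List.ext_getElem
  · simp
  · intro i h1 h2
    by_cases hij : i = j
    · subst hij; simp
    · simp [hij, Ne.symm hij]

theorem map_range_congr {f g : Nat → Int} {n : Nat} (h : ∀ i, i < n → f i = g i) :
    (List.range n).map f = (List.range n).map g := by
  apply List.map_congr_left
  intro i hi
  exact h i (List.mem_range.mp hi)

theorem Lst_zero (a : List Int) : Lst a 0 = List.replicate a.length 1 := by
  unfold Lst
  rw [show (fun i => if i ≤ 0 then ((elL a i : Nat) : Int) else 1) = (fun _ : Nat => (1 : Int)) from ?_]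
  · rw [List.map_const', List.length_range]
  · funext i
    cases i with
    | zero => simp [elL]
    | succ k => simp

theorem Rst_init (a : List Int) : Rst a (a.length - 1) = List.replicate a.length 1 := by
  unfold Rst
  rw [map_range_congr (g := fun _ => (1 : Int)) ?_]
  · rw [List.map_const', List.length_range]
  · intro i hi
    split
    · next h =>
        have hi1 : i = a.length - 1 := by omega
        subst hi1
        rw [elR, dif_neg (by omega)]
        simp
    · rfl

theorem Lst_getD (a : List Int) (m k : Nat) (hk : k < a.length) :
    (Lst a m).getD k 0 = if k ≤ m then ((elL a k : Nat) : Int) else 1 :=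
  PySem.List.getD_map_range _ _ _ _ hk

theorem Rst_getD (a : List Int) (t k : Nat) (hk : k < a.length) :
    (Rst a t).getD k 0 = if t ≤ k then ((elR a k : Nat) : Int) else 1 :=
  PySem.List.getD_map_range _ _ _ _ hk

theorem stepAL_eval (a : List Int) (m : Nat) (hm : m + 1 < a.length) :
    stepAL a (Lst a m) ((m + 1 : Nat) : Int) = Lst a (m + 1) := by
  unfold stepAL
  have e1 : ((m + 1 : Nat) : Int) - 1 = (m : Int) := by push_cast; ring
  rw [e1, PySem.List.pyGetD_natCast, PySem.List.pyGetD_natCast, PySem.List.pyGetD_natCast,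
      PySem.List.pySetD_natCast]
  rw [Lst_getD a m m (by omega), if_pos (le_refl m)]
  by_cases hc : a.getD m 0 ≤ a.getD (m + 1) 0
  · rw [if_pos hc]
    unfold Lst
    rw [set_map_range _ hm]
    apply map_range_congr
    intro i hi
    by_cases hi1 : i = m + 1
    · subst hi1
      rw [if_pos rfl, if_pos (le_refl _), elL_step a m hc]
      push_cast; ring
    · rw [if_neg hi1]
      exact if_congr (by omega) rfl rfl
  · rw [if_neg hc]
    unfold Lst
    apply map_range_congr
    intro i hi
    by_cases hi1 : i = m + 1
    · subst hi1
      rw [if_neg (by omega), if_pos (le_refl _)]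
      have : elL a (m + 1) = 1 := by
        show (if a.getD m 0 ≤ a.getD (m + 1) 0 then elL a m + 1 else 1) = 1
        rw [if_neg hc]
      rw [this]
      simp
    · exact if_congr (by omega) rfl rfl

theorem stepAR_eval (a : List Int) (j : Nat) (hj : j + 1 < a.length) :
    stepAR a (Rst a (j + 1)) ((j : Nat) : Int) = Rst a j := by
  unfold stepAR
  have e1 : ((j : Nat) : Int) + 1 = ((j + 1 : Nat) : Int) := by push_cast; ring
  rw [e1, PySem.List.pyGetD_natCast, PySem.List.pyGetD_natCast, PySem.List.pyGetD_natCast,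
      PySem.List.pySetD_natCast]
  rw [Rst_getD a (j + 1) (j + 1) hj, if_pos (le_refl _)]
  have hRj : a.getD j 0 ≤ a.getD (j + 1) 0 → elR a j = elR a (j + 1) + 1 := by
    intro hc; rw [elR, dif_pos hj, if_pos hc]
  have hRj' : ¬ a.getD j 0 ≤ a.getD (j + 1) 0 → elR a j = 1 := by
    intro hc; rw [elR, dif_pos hj, if_neg hc]
  by_cases hc : a.getD j 0 ≤ a.getD (j + 1) 0
  · rw [if_pos hc]
    unfold Rst
    rw [set_map_range _ (by omega)]
    apply map_range_congr
    intro i hi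
    by_cases hi1 : i = j
    · subst hi1
      rw [if_pos rfl, if_pos (le_refl _), hRj hc]
      push_cast; ring
    · rw [if_neg hi1]
      exact if_congr (by omega) rfl rfl
  · rw [if_neg hc]
    unfold Rst
    apply map_range_congr
    intro i hi
    by_cases hi1 : i = j
    · subst hi1
      rw [if_neg (by omega), if_pos (le_refl _), hRj' hc]
      simp
    · exact if_congr (by omega) rfl rfl

theorem portA_lloop (a : List Int) : ∀ m, m + 1 ≤ a.length →
    (List.range m).foldl (fun l (k : Nat) => stepAL a l (1 + (k : Int))) (List.replicate a.length 1) = Lst a m := by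
  intro m
  induction m with
  | zero => intro _; exact (Lst_zero a).symm
  | succ k ih =>
      intro h
      rw [List.range_succ, List.foldl_append, ih (by omega)]
      simp only [List.foldl_cons, List.foldl_nil]
      have e : 1 + (k : Int) = ((k + 1 : Nat) : Int) := by push_cast; ring
      rw [e, stepAL_eval a k (by omega)]

theorem portA_rloop (a : List Int) : ∀ m, m ≤ a.length - 1 →
    (List.range m).foldl (fun r (k : Nat) => stepAR a r ((a.length : Int) - 2 - (k : Int))) (List.replicate a.length 1) = Rst a (a.length - 1 - m) := by
  intro m
  induction m with
  | zero => intro _; simpa using (Rst_init a).symm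
  | succ k ih =>
      intro h
      rw [List.range_succ, List.foldl_append, ih (by omega)]
      simp only [List.foldl_cons, List.foldl_nil]
      have e : ((a.length : Int) - 2 - (k : Int)) = ((a.length - 2 - k : Nat) : Int) := by
        have : k + 2 ≤ a.length := by omega
        omega
      have e2 : a.length - 1 - k = (a.length - 2 - k) + 1 := by omega
      rw [e, e2, stepAR_eval a (a.length - 2 - k) (by omega)]
      have e3 : a.length - 2 - k = a.length - 1 - (k + 1) := by omega
      rw [e3]

theorem foldl_max_cast (t : List Nat) : ∀ acc : Nat,
    (t.map (fun (x : Nat) => (x : Int))).foldl max (acc : Int) = ((t.foldl max acc : Nat) : Int) := by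
  induction t with
  | nil => intro acc; rfl
  | cons x s ih =>
      intro acc
      simp only [List.map_cons, List.foldl_cons]
      rw [← Nat.cast_max, ih]

theorem max_cast_range (f : Nat → Nat) (n : Nat) (hn : 0 < n) :
    PySem.List.max? ((List.range n).map (fun k => ((f k : Nat) : Int))) (fun x => x)
      = some (((List.range n).foldl (fun s k => max s (f k)) 0 : Nat) : Int) := by
  obtain ⟨m, rfl⟩ : ∃ m, n = m + 1 := ⟨n - 1, by omega⟩
  rw [List.range_succ_eq_map]
  simp only [List.map_cons, List.map_map]
  rw [PySem.List.max?_id_cons]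
  have h1 : (List.range m).map ((fun k => ((f k : Nat) : Int)) ∘ (fun i => i + 1))
      = ((List.range m).map (fun k => f (k + 1))).map (fun (x : Nat) => (x : Int)) := by
    rw [List.map_map]; rfl
  rw [h1, foldl_max_cast]
  congr 1
  rw [List.foldl_map]
  simp only [List.foldl_cons]
  have : max 0 (f 0) = f 0 := by omega
  rw [this]
  rw [List.foldl_map]

theorem stepAns_eval (a : List Int) (k : Nat) (hk : k < a.length) (acc : Int) :
    stepAns a (Lst a (a.length - 1)) (Rst a 0) (a.length : Int) acc ((k : Nat) : Int)
      = max acc ((candA a k : Nat) : Int) := by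
  unfold stepAns
  dsimp only
  congr 1
  have hL : ∀ i : Nat, i < a.length → (Lst a (a.length - 1)).getD i 0 = ((elL a i : Nat) : Int) := by
    intro i hi
    rw [Lst_getD a _ i hi, if_pos (by omega)]
  have hR : ∀ i : Nat, i < a.length → (Rst a 0).getD i 0 = ((elR a i : Nat) : Int) := by
    intro i hi
    rw [Rst_getD a 0 i hi, if_pos (by omega)]
  rcases Nat.eq_zero_or_pos k with hk0 | hk1
  · subst hk0
    simp only [Nat.cast_zero]
    rw [if_pos trivial]
    rw [candA_zero]
    by_cases h2 : 1 < a.length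
    · rw [if_pos (show (0 : Int) + 1 < (a.length : Int) by omega), if_pos h2]
      have e : (0 : Int) + 1 = ((1 : Nat) : Int) := by norm_num
      rw [e, PySem.List.pyGetD_natCast, hR 1 h2]
      push_cast
      ring_nf
    · rw [if_neg (show ¬ ((0 : Int) + 1 < (a.length : Int)) by omega), if_neg h2]
      simp
  · rw [if_neg (by omega)]
    have e1 : ((k : Nat) : Int) - 1 = ((k - 1 : Nat) : Int) := by push_cast [hk1]; omega
    have hleft : (if 0 ≤ ((k : Nat) : Int) - 1 then PySem.List.pyGetD (Lst a (a.length - 1)) (((k : Nat) : Int) - 1) 0 else 0) = ((elL a (k - 1) : Nat) : Int) := by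
      rw [if_pos (by omega), e1, PySem.List.pyGetD_natCast, hL (k - 1) (by omega)]
    by_cases hlast : k = a.length - 1
    · rw [if_pos (by omega), hleft, candA_last a k hk1 hlast]
      push_cast; ring
    · rw [if_neg (by omega)]
      have hk2 : k + 1 < a.length := by omega
      have e2 : ((k : Nat) : Int) + 1 = ((k + 1 : Nat) : Int) := by push_cast; ring
      have hright : (if ((k : Nat) : Int) + 1 < (a.length : Int) then PySem.List.pyGetD (Rst a 0) (((k : Nat) : Int) + 1) 0 else 0) = ((elR a (k + 1) : Nat) : Int) := by
        rw [if_pos (by omega), e2, PySem.List.pyGetD_natCast, hR (k + 1) hk2]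
      rw [e1, e2, PySem.List.pyGetD_natCast, PySem.List.pyGetD_natCast]
      rw [← e1, hleft, ← e2, hright]
      by_cases hbr : a.getD (k - 1) 0 ≤ a.getD (k + 1) 0
      · rw [if_pos hbr, candA_mid_bridge a k hk1 hk2 hbr]
        push_cast; ring
      · rw [if_neg hbr, candA_mid_nobridge a k hk1 hk2 hbr]
        push_cast [Nat.cast_max]; ring

theorem foldl_max_cast2 (f : Nat → Nat) (t : List Nat) : ∀ acc : Nat,
    t.foldl (fun (s : Int) k => max s ((f k : Nat) : Int)) (acc : Int)
      = ((t.foldl (fun s k => max s (f k)) acc : Nat) : Int) := by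
  induction t with
  | nil => intro acc; rfl
  | cons x s ih =>
      intro acc
      simp only [List.foldl_cons]
      rw [← Nat.cast_max, ih]

theorem portA_eq (arr : List Int) (hne : arr ≠ []) :
    longestNonDecreasingSubarrayWithOneSubstitution arr = (ansAM arr : Int) := by
  have hn : 0 < arr.length := List.length_pos_iff.mpr hne
  have h0 : longestNonDecreasingSubarrayWithOneSubstitution arr =
      (let l := (PySem.List.pyRange 1 (arr.length : Int) 1).foldl (stepAL arr) (List.replicate arr.length 1)
       let r := (PySem.List.pyRange ((arr.length : Int) - 2) (-1) (-1)).foldl (stepAR arr) (List.replicate arr.length 1)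
       let ans : Int := match PySem.List.max? l (fun x => x) with
         | some m => m
         | none => 0
       (PySem.List.pyRange 0 (arr.length : Int) 1).foldl (stepAns arr l r (arr.length : Int)) ans) := rfl
  rw [h0]
  have hl : (PySem.List.pyRange 1 (arr.length : Int) 1).foldl (stepAL arr) (List.replicate arr.length 1) = Lst arr (arr.length - 1) := by
    rw [PySem.List.pyRange_one, List.foldl_map]
    have e : ((arr.length : Int) - 1).toNat = arr.length - 1 := by omega
    rw [e]
    exact portA_lloop arr (arr.length - 1) (by omega)
  have hr : (PySem.List.pyRange ((arr.length : Int) - 2) (-1) (-1)).foldl (stepAR arr) (List.replicate arr.length 1) = Rst arr 0 := by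
    rw [PySem.List.pyRange_neg_one, List.foldl_map]
    have e : ((arr.length : Int) - 2 - (-1)).toNat = arr.length - 1 := by omega
    rw [e]
    have := portA_rloop arr (arr.length - 1) (le_refl _)
    simpa using this
  simp only [hl, hr]
  have hLmap : Lst arr (arr.length - 1) = (List.range arr.length).map (fun k => ((elL arr k : Nat) : Int)) := by
    unfold Lst
    apply map_range_congr
    intro i hi
    rw [if_pos (by omega)]
  have hmax : (match PySem.List.max? (Lst arr (arr.length - 1)) (fun x => x) with
      | some m => m
      | none => (0 : Int)) = ((maxLM arr : Nat) : Int) := by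
    rw [hLmap, max_cast_range (elL arr) arr.length hn]
    rfl
  rw [hmax]
  rw [PySem.List.pyRange_zero_nat, List.foldl_map]
  have hbody : (List.range arr.length).foldl (fun ans (k : Nat) => stepAns arr (Lst arr (arr.length - 1)) (Rst arr 0) (arr.length : Int) ans (k : Int)) ((maxLM arr : Nat) : Int)
      = (List.range arr.length).foldl (fun ans (k : Nat) => max ans ((candA arr k : Nat) : Int)) ((maxLM arr : Nat) : Int) := by
    apply PySem.List.foldl_congr_mem
    intro acc k hkmem
    exact stepAns_eval arr k (List.mem_range.mp hkmem) acc
  rw [hbody, foldl_max_cast2]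
  rfl

-- the loop body of port B, as a named function (identical text)
def stepB (arr : List Int) (s : Int × Int × Int × Int) (i : Int) : Int × Int × Int × Int :=
  let ans := s.1
  let fprev2 := s.2.1
  let fprev := s.2.2.1
  let g := s.2.2.2
  let t : Int × Int × Int :=
    if i = 0 then (1, 1, 1)
    else
      let fcur := if PySem.List.pyGetD arr i 0 ≥ PySem.List.pyGetD arr (i - 1) 0 then fprev + 1 else 1
      let keep := if PySem.List.pyGetD arr i 0 ≥ PySem.List.pyGetD arr (i - 1) 0 then g + 1 else 1
      let swap := if 2 ≤ i ∧ PySem.List.pyGetD arr i 0 ≥ PySem.List.pyGetD arr (i - 2) 0 then fprev2 + 2 else 2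
      (fcur, max keep swap, fprev + 1)
  (max (max ans t.2.1) t.2.2, fprev, t.1, t.2.1)

def pansB (a : List Int) (m : Nat) : Nat :=
  (List.range m).foldl (fun s k => max s (max (dpG a k) (dpH a k))) 0

def Bst (a : List Int) (m : Nat) : Int × Int × Int × Int :=
  if m = 0 then (0, 0, 0, 0)
  else (↑(pansB a m), if 2 ≤ m then (↑(elL a (m - 2)) : Int) else 0, ↑(elL a (m - 1)), ↑(dpG a (m - 1)))

theorem pansB_succ (a : List Int) (m : Nat) :
    pansB a (m + 1) = max (pansB a m) (max (dpG a m) (dpH a m)) := by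
  unfold pansB
  rw [List.range_succ, List.foldl_append]
  rfl

theorem Bst_step (a : List Int) (m : Nat) : stepB a (Bst a m) ↑m = Bst a (m + 1) := by
  cases m with
  | zero =>
      show stepB a (0, 0, 0, 0) 0 = Bst a 1
      simp [stepB, Bst, pansB, List.range_succ, dpG, dpH, elL]
  | succ k =>
      have hm0 : ((k + 1 : Nat) : Int) ≠ 0 := by push_cast; omega
      have e1 : ((k + 1 : Nat) : Int) - 1 = (k : Int) := by push_cast; ring
      unfold stepB
      dsimp only
      rw [if_neg hm0]
      rw [e1, PySem.List.pyGetD_natCast, PySem.List.pyGetD_natCast]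
      have hBst : Bst a (k + 1) = (↑(pansB a (k + 1)), if 2 ≤ k + 1 then (↑(elL a (k + 1 - 2)) : Int) else 0, ↑(elL a k), ↑(dpG a k)) := by
        unfold Bst
        rw [if_neg (by omega)]
        simp only [Nat.add_sub_cancel]
      rw [hBst]
      dsimp only
      have hf : (if a.getD (k + 1) 0 ≥ a.getD k 0 then (↑(elL a k) : Int) + 1 else 1) = ↑(elL a (k + 1)) := by
        show _ = ((if a.getD k 0 ≤ a.getD (k + 1) 0 then elL a k + 1 else 1 : Nat) : Int)
        split <;> omega
      have hswap : (if 2 ≤ ((k + 1 : Nat) : Int) ∧ a.getD (k + 1) 0 ≥ PySem.List.pyGetD a ((↑(k + 1) : Int) - 2) 0 then (if 2 ≤ k + 1 then (↑(elL a (k + 1 - 2)) : Int) else 0) + 2 else 2)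
          = ((if 1 ≤ k ∧ a.getD (k - 1) 0 ≤ a.getD (k + 1) 0 then elL a (k - 1) + 2 else 2 : Nat) : Int) := by
        by_cases hk : 1 ≤ k
        · have e2 : ((k + 1 : Nat) : Int) - 2 = ((k - 1 : Nat) : Int) := by push_cast [hk]; omega
          have e3 : k + 1 - 2 = k - 1 := by omega
          rw [e2, e3, PySem.List.pyGetD_natCast]
          have ciff : (2 ≤ ((k + 1 : Nat) : Int) ∧ a.getD (k + 1) 0 ≥ a.getD (k - 1) 0) ↔ (1 ≤ k ∧ a.getD (k - 1) 0 ≤ a.getD (k + 1) 0) := by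
            constructor
            · rintro ⟨h1, h2⟩; exact ⟨hk, h2⟩
            · rintro ⟨h1, h2⟩; exact ⟨by push_cast; omega, h2⟩
          rw [if_congr ciff rfl rfl]
          split
          · rw [if_pos (show 2 ≤ k + 1 by omega)]; omega
          · omega
        · have hk0 : k = 0 := by omega
          subst hk0
          rw [if_neg (by rintro ⟨h, -⟩; norm_num at h), if_neg (by rintro ⟨h, -⟩; omega)]
          simp
      have hkeep : (if a.getD (k + 1) 0 ≥ a.getD k 0 then (↑(dpG a k) : Int) + 1 else 1) = ((if a.getD k 0 ≤ a.getD (k + 1) 0 then dpG a k + 1 else 1 : Nat) : Int) := by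
        split <;> omega
      rw [hf, hswap, hkeep]
      have hg : max ((if a.getD k 0 ≤ a.getD (k + 1) 0 then dpG a k + 1 else 1 : Nat) : Int) ((if 1 ≤ k ∧ a.getD (k - 1) 0 ≤ a.getD (k + 1) 0 then elL a (k - 1) + 2 else 2 : Nat) : Int) = ((dpG a (k + 1) : Nat) : Int) := by
        rw [dpG_succ_eval]; push_cast [Nat.cast_max]; ring_nf
      rw [hg]
      have hans : max (max (↑(pansB a (k + 1)) : Int) ↑(dpG a (k + 1))) (↑(elL a k) + 1) = ↑(pansB a (k + 2)) := by
        have : ((elL a k : Nat) : Int) + 1 = ((dpH a (k + 1) : Nat) : Int) := by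
          show _ = ((elL a k + 1 : Nat) : Int); push_cast; ring
        rw [this, pansB_succ a (k + 1)]
        push_cast [Nat.cast_max]
        rw [max_assoc]
      rw [hans]
      unfold Bst
      rw [if_neg (by omega)]
      have e4 : k + 2 - 2 = k := by omega
      have e5 : k + 2 - 1 = k + 1 := by omega
      rw [if_pos (by omega), e4, e5]

theorem portB_loop (arr : List Int) : ∀ m,
    (List.range m).foldl (fun s (k : Nat) => stepB arr s (k : Int)) (0, 0, 0, 0) = Bst arr m := by
  intro m
  induction m with
  | zero => simp [Bst]
  | succ k ih =>
      rw [List.range_succ, List.foldl_append, ih]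
      simpa using Bst_step arr k

theorem portB_eq (arr : List Int) :
    longestNonDecreasingSubarrayWithOneSubstitution_alt arr = (ansBM arr : Int) := by
  have h0 : longestNonDecreasingSubarrayWithOneSubstitution_alt arr
      = ((PySem.List.pyRange 0 (arr.length : Int) 1).foldl (stepB arr) (0, 0, 0, 0)).1 := rfl
  rw [h0, PySem.List.pyRange_zero_nat, List.foldl_map, portB_loop arr arr.length]
  cases h : arr.length with
  | zero => simp [Bst, ansBM, h]
  | succ k =>
      unfold Bst
      rw [if_neg (by omega)]
      show ((pansB arr (k + 1) : Nat) : Int) = _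
      rw [← h]
      rfl

-- ===== VERDICT (by name: the statement is the Claim_ definition above) =====
theorem longestNonDecreasingSubarrayWithOneSubstitution_spec : Claim_equal_longestNonDecreasingSubarrayWithOneSubstitution := by
  intro arr _ hpre
  unfold Spec_longestNonDecreasingSubarrayWithOneSubstitution
  rw [portA_eq arr hpre, portB_eq arr, ansAM_eq_ansBM arr]
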